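-- pv_equiv track=rewrite | github.com/thanhlongnt/Amazon-ELT-and-Recommendation-System | common_scripts/04_create_train_data.py | build_category_index
-- ===== SOURCE A (Python) =====
-- from typing import Dict, List
--
-- def build_category_index(categories: List[str]) -> Dict[str, int]:
--     """
--     Build a mapping category_name -> integer index, with 0 reserved for 'Unknown'.
--     """
--     cat_to_idx = {"Unknown": 0}
--     idx = 1
--     for cat in categories:
--         if cat not in cat_to_idx:
--             cat_to_idx[cat] = idx
--             idx += 1
--     return cat_to_idx
-- ===== SOURCE B (Python) =====
-- def build_category_index(categories):
--     # Different algorithm: find each category's FIRST-occurrence position by a single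
--     # reverse scan (earlier positions overwrite later ones), then sort the categories
--     # by that position and assign 1,2,... in sorted order; 'Unknown' is fixed at 0.
--     first = {}
--     for pos, cat in reversed(list(enumerate(categories))):
--         if cat != "Unknown":
--             first[cat] = pos
--     result = {"Unknown": 0}
--     for i, (cat, _) in enumerate(sorted(first.items(), key=lambda kv: kv[1]), 1):
--         result[cat] = i
--     return result
-- ===== Notes on version B (the rewrite author's own statement) =====
-- stated objective: alternative
-- what changed: Instead of A's single forward pass that interleaves a membership test with counter-based index assignment, B computes each category's first-occurrence position by a reverse scan with overwriting, then sorts the categories by that position and assigns indices in sorted order.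
import Mathlib
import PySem

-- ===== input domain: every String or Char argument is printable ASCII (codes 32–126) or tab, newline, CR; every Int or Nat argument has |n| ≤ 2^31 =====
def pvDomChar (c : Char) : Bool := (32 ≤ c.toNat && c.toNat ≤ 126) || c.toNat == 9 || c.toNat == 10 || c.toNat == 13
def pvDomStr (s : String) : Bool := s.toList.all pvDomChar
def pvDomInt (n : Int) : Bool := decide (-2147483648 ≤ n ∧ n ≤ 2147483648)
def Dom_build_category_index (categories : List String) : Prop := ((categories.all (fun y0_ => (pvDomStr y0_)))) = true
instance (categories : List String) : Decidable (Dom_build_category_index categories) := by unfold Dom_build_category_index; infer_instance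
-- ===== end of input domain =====

-- B uses a different algorithm (reverse scan for first-occurrence positions, then a sort by
-- position) instead of A's interleaved membership-check-and-count loop; return values proven equal.

-- ===== PORT A =====
def build_category_index (categories : List String) : List (String × Int) :=
  let init : PySem.Dict String Int := PySem.Dict.ofList [("Unknown", 0)]
  (categories.foldl
    (fun (st : PySem.Dict String Int × Int) cat =>
      if !st.1.contains cat then (st.1.insert cat st.2, st.2 + 1) else st)
    (init, 1)).1.items

-- ===== PORT B =====
-- first = {}; for pos, cat in reversed(list(enumerate(categories))): if cat != "Unknown": first[cat] = pos
def pvFirstDict (categories : List String) : PySem.Dict String Int :=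
  (PySem.List.enumerate categories 0).reverse.foldl
    (fun d p => if p.2 != "Unknown" then d.insert p.2 p.1 else d) PySem.Dict.empty

-- result = {"Unknown": 0}; for i, (cat, _) in enumerate(sorted(first.items(), key=kv[1]), 1): result[cat] = i
def build_category_index_alt (categories : List String) : List (String × Int) :=
  ((PySem.List.enumerate
      (PySem.List.sorted (pvFirstDict categories).items (fun kv => kv.2) false) 1).foldl
    (fun (res : PySem.Dict String Int) q => res.insert q.2.1 q.1)
    (PySem.Dict.ofList [("Unknown", 0)])).items

-- ===== PRECONDITION & SPEC =====
def Spec_build_category_index (categories : List String) (out : List (String × Int)) : Prop := out = build_category_index_alt categories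
instance (categories : List String) (out : List (String × Int)) : Decidable (Spec_build_category_index categories out) := by unfold Spec_build_category_index; infer_instance

-- ===== CLAIM (what is proved, stated in full; the proofs are below) =====
def Claim_equal_build_category_index : Prop := ∀ (categories : List String), Dom_build_category_index categories → Spec_build_category_index categories (build_category_index categories)

-- ===== LEMMAS AND PROOFS =====

/-- The first occurrences (with their positions), in order, of elements of `cs`
not already in `seen`, positions counted from `i`. -/
def pvFirsts (cs : List String) (i : Int) (seen : List String) : List (String × Int) :=
  match cs with
  | [] => []
  | c :: cs' => if c ∈ seen then pvFirsts cs' (i + 1) seen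
                else (c, i) :: pvFirsts cs' (i + 1) (seen ++ [c])

/-- The first occurrences, in order, of elements of `cs` not already in `seen`. -/
def pvNews (cs : List String) (seen : List String) : List String :=
  match cs with
  | [] => []
  | c :: cs' => if c ∈ seen then pvNews cs' seen else c :: pvNews cs' (seen ++ [c])

lemma pvNews_eq_map_fst (cs : List String) : ∀ (i : Int) (seen : List String),
    pvNews cs seen = (pvFirsts cs i seen).map Prod.fst := by
  induction cs with
  | nil => intro i seen; simp [pvNews, pvFirsts]
  | cons c cs ih =>
    intro i seen
    by_cases h : c ∈ seen
    · rw [pvNews, if_pos h, pvFirsts, if_pos h, ih (i + 1)]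
    · rw [pvNews, if_neg h, pvFirsts, if_neg h, List.map_cons, ih (i + 1)]

lemma pvFirsts_fst_not_mem_seen (cs : List String) : ∀ (i : Int) (seen : List String)
    (p : String × Int), p ∈ pvFirsts cs i seen → p.1 ∉ seen := by
  induction cs with
  | nil => intro i seen p hp; simp [pvFirsts] at hp
  | cons c cs ih =>
    intro i seen p hp
    by_cases h : c ∈ seen
    · rw [pvFirsts, if_pos h] at hp; exact ih _ _ _ hp
    · rw [pvFirsts, if_neg h, List.mem_cons] at hp
      rcases hp with hp | hp
      · rw [hp]; simpa using h
      · have := ih _ _ _ hp; intro hmem; exact this (by simp [hmem])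

lemma pvFirsts_snd_lt (cs : List String) : ∀ (i : Int) (seen : List String)
    (p : String × Int), p ∈ pvFirsts cs i seen → i ≤ p.2 := by
  induction cs with
  | nil => intro i seen p hp; simp [pvFirsts] at hp
  | cons c cs ih =>
    intro i seen p hp
    by_cases h : c ∈ seen
    · rw [pvFirsts, if_pos h] at hp; have := ih _ _ _ hp; omega
    · rw [pvFirsts, if_neg h, List.mem_cons] at hp
      rcases hp with hp | hp
      · subst hp; simp
      · have := ih _ _ _ hp; omega

lemma pvFirsts_pairwise (cs : List String) : ∀ (i : Int) (seen : List String),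
    (pvFirsts cs i seen).Pairwise (fun a b => a.2 < b.2) := by
  induction cs with
  | nil => intro i seen; simp [pvFirsts]
  | cons c cs ih =>
    intro i seen
    by_cases h : c ∈ seen
    · rw [pvFirsts, if_pos h]; exact ih _ _
    · rw [pvFirsts, if_neg h]
      exact List.pairwise_cons.mpr
        ⟨fun p hp => by have := pvFirsts_snd_lt cs _ _ p hp; omega, ih _ _⟩

lemma not_mem_pvFirsts (cs : List String) : ∀ (i : Int) (seen : List String)
    (k : String) (v : Int), k ∈ seen → (k, v) ∉ pvFirsts cs i seen := by
  intro i seen k v hk hmem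
  exact pvFirsts_fst_not_mem_seen cs i seen _ hmem hk

/-- Membership in `pvFirsts` is exactly `find?` of the first matching entry of `enumerate`. -/
lemma mem_pvFirsts_iff (cs : List String) : ∀ (i : Int) (seen : List String)
    (k : String) (v : Int), k ∉ seen →
    ((k, v) ∈ pvFirsts cs i seen ↔
      (PySem.List.enumerate cs i).find? (fun p => p.2 == k) = some (v, k)) := by
  induction cs with
  | nil => intro i seen k v hk; simp [pvFirsts, PySem.List.enumerate_nil]
  | cons c cs ih =>
    intro i seen k v hk
    rw [PySem.List.enumerate_cons]
    by_cases hck : c = k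
    · subst hck
      have hc : c ∉ seen := hk
      rw [List.find?_cons_of_pos (by simp), pvFirsts, if_neg hc, List.mem_cons]
      constructor
      · rintro (h | h)
        · rw [Prod.mk.injEq] at h
          rw [h.2]
        · exact absurd h (not_mem_pvFirsts cs _ _ _ _ (by simp))
      · intro h
        left
        have : i = v := by
          rw [Option.some.injEq, Prod.mk.injEq] at h
          exact h.1
        rw [this]
    · rw [List.find?_cons_of_neg (by simpa using hck)]
      by_cases h : c ∈ seen
      · rw [pvFirsts, if_pos h]; exact ih _ _ _ _ hk
      · rw [pvFirsts, if_neg h]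
        have hk' : k ∉ seen ++ [c] := by
          simp only [List.mem_append, List.mem_singleton]
          rintro (hh | hh)
          · exact hk hh
          · exact hck hh.symm
        rw [List.mem_cons, ih _ _ _ _ hk']
        constructor
        · rintro (hh | hh)
          · rw [Prod.mk.injEq] at hh
            exact absurd hh.1.symm hck
          · exact hh
        · exact Or.inr

/-- Last insert wins: `get?` after a fold of inserts keyed by `.2`. -/
lemma pvGet_foldl_insert (ps : List (Int × String)) (d : PySem.Dict String Int) (k : String) :
    (ps.foldl (fun d p => d.insert p.2 p.1) d).get? k =
      match ps.reverse.find? (fun p => p.2 == k) with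
      | some p => some p.1
      | none => d.get? k := by
  induction ps using List.reverseRecOn generalizing d with
  | nil => simp
  | append_singleton ps p ih =>
    rw [List.foldl_append, List.foldl_cons, List.foldl_nil, List.reverse_append,
      List.reverse_singleton, List.singleton_append]
    by_cases h : p.2 = k
    · rw [List.find?_cons_of_pos (by simpa using h), ← h, PySem.Dict.get?_insert_self]
    · rw [List.find?_cons_of_neg (by simpa using h),
        PySem.Dict.get?_insert_of_ne _ _ (Ne.symm h), ih]

lemma pvFind?_filter (l : List (Int × String)) (p q : Int × String → Bool) :
    (l.filter p).find? q = l.find? (fun a => p a && q a) := by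
  induction l with
  | nil => simp
  | cons a l ih =>
    rw [List.filter_cons]
    by_cases hp : p a = true
    · rw [if_pos hp, List.find?_cons, List.find?_cons]
      simp only [hp, Bool.true_and]
      cases q a <;> simp [ih]
    · have hp' : p a = false := by simpa using hp
      rw [if_neg (by simp [hp']), List.find?_cons]
      simp only [hp', Bool.false_and]
      exact ih

lemma pvEnumerate_map_fst (T : List (String × Int)) : ∀ (s : Int),
    PySem.List.enumerate (T.map Prod.fst) s
      = (PySem.List.enumerate T s).map (fun p => (p.1, p.2.1)) := by
  induction T with
  | nil => intro s; simp [PySem.List.enumerate_nil]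
  | cons a T ih => intro s; rw [List.map_cons, PySem.List.enumerate_cons,
      PySem.List.enumerate_cons, List.map_cons, ih]

lemma pvFirsts_fst_nodup (cs : List String) : ∀ (i : Int) (seen : List String),
    ((pvFirsts cs i seen).map Prod.fst).Nodup := by
  induction cs with
  | nil => intro i seen; simp [pvFirsts]
  | cons c cs ih =>
    intro i seen
    by_cases h : c ∈ seen
    · rw [pvFirsts, if_pos h]; exact ih _ _
    · rw [pvFirsts, if_neg h, List.map_cons, List.nodup_cons]
      refine ⟨?_, ih _ _⟩
      intro hmem
      rcases List.mem_map.mp hmem with ⟨p, hp, hpc⟩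
      exact pvFirsts_fst_not_mem_seen cs _ _ p hp (by simp [hpc])

/-- A's loop, characterised: it appends the enumerated fresh categories. -/
lemma pvLoopA_items (cs : List String) : ∀ (d : PySem.Dict String Int) (i : Int),
    d.keys.Nodup → i = (d.size : Int) →
    (cs.foldl
      (fun (st : PySem.Dict String Int × Int) cat =>
        if !st.1.contains cat then (st.1.insert cat st.2, st.2 + 1) else st)
      (d, i)).1.items
    = d.items ++ (PySem.List.enumerate (pvNews cs d.keys) i).map (fun p => (p.2, p.1)) := by
  induction cs with
  | nil => intro d i _ _; simp [pvNews, PySem.List.enumerate_nil]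
  | cons c cs ih =>
    intro d i hnd hi
    by_cases hc : d.contains c = true
    · have hmem : c ∈ d.keys := (PySem.Dict.contains_iff_mem_keys d c).mp hc
      rw [List.foldl_cons, if_neg (by simp [hc])]
      rw [ih d i hnd hi, pvNews, if_pos hmem]
    · have hc' : d.contains c = false := by simpa using hc
      have hmem : c ∉ d.keys := fun h => by
        rw [(PySem.Dict.contains_iff_mem_keys d c).mpr h] at hc'; simp at hc'
      rw [List.foldl_cons, if_pos (by simp [hc'])]
      have hkeys : (d.insert c i).keys = d.keys ++ [c] :=
        PySem.Dict.keys_insert_of_not_contains d i hc'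
      have hitems : (d.insert c i).items = d.items ++ [(c, i)] :=
        PySem.Dict.items_insert_of_not_contains d i hc'
      have hsize : ((d.insert c i).size : Int) = i + 1 := by
        have : (d.insert c i).size = d.size + 1 := by
          simp [PySem.Dict.size, hitems]
        rw [this, hi]; push_cast; ring
      have hnd' : (d.insert c i).keys.Nodup := by
        rw [hkeys]; simp [List.nodup_append, hnd]
        intro a ha h; exact hmem (h ▸ ha)
      rw [ih (d.insert c i) (i + 1) hnd' hsize.symm, hitems, hkeys,
        pvNews, if_neg hmem, PySem.List.enumerate_cons]
      simp

/-- B's `first` dict looks up the first-occurrence position. -/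
lemma pvFirst_get? (categories : List String) (k : String) :
    (pvFirstDict categories).get? k
    = ((PySem.List.enumerate categories 0).find?
        (fun p => (p.2 != "Unknown") && (p.2 == k))).map Prod.fst := by
  unfold pvFirstDict
  rw [PySem.List.foldl_if_eq_foldl_filter, pvGet_foldl_insert,
    ← List.filter_reverse, List.reverse_reverse, pvFind?_filter]
  cases (PySem.List.enumerate categories 0).find?
      (fun p : Int × String => (p.2 != "Unknown") && (p.2 == k)) with
  | some p => rfl
  | none => simp [PySem.Dict.get?_empty]

-- ===== VERDICT (by name: the statement is the Claim_ definition above) =====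
theorem build_category_index_spec : Claim_equal_build_category_index := by
  intro categories _
  unfold Spec_build_category_index build_category_index build_category_index_alt
  -- A side
  have hinit : (PySem.Dict.ofList [(("Unknown" : String), (0 : Int))]).items
      = [(("Unknown" : String), (0 : Int))] := by decide
  have hkeys : (PySem.Dict.ofList [(("Unknown" : String), (0 : Int))]).keys = ["Unknown"] := by decide
  have hsize : ((PySem.Dict.ofList [(("Unknown" : String), (0 : Int))]).size : Int) = 1 := by decide
  rw [pvLoopA_items categories _ 1 (by rw [hkeys]; simp) hsize.symm, hinit, hkeys]
  -- B side: the first-occurrence dict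
  set first := pvFirstDict categories with hfirst
  set T := pvFirsts categories 0 ["Unknown"] with hT
  have hTpair : T.Pairwise (fun a b => a.2 < b.2) := pvFirsts_pairwise categories 0 ["Unknown"]
  have hTnodup : T.Nodup := hTpair.imp (fun h => by intro he; rw [he] at h; omega)
  have hfkeys : first.keys.Nodup := by
    rw [hfirst]
    unfold pvFirstDict
    rw [PySem.List.foldl_if_eq_foldl_filter]
    exact PySem.Dict.nodup_keys_foldl_insert_key _ (fun p : Int × String => p.2)
      (fun (d : PySem.Dict String Int) (p : Int × String) => p.1) _ (by decide)
  have hfnodup : first.items.Nodup := List.Nodup.of_map Prod.fst hfkeys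
  have hget : ∀ (k : String) (v : Int), first.get? k = some v ↔ (k, v) ∈ first.items :=
    fun k v => PySem.Dict.get?_eq_some_iff_mem_items first k v hfkeys
  have hmemT : ∀ a : String × Int, a ∈ T ↔ a ∈ first.items := by
    rintro ⟨k, v⟩
    rw [← hget k v, hfirst, pvFirst_get?]
    by_cases hu : k = "Unknown"
    · subst hu
      have hnone : (PySem.List.enumerate categories 0).find?
          (fun p => (p.2 != "Unknown") && (p.2 == "Unknown")) = none := by
        rw [List.find?_eq_none]
        intro x _
        cases hx : (x.2 == "Unknown") <;> simp [bne, hx]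
      rw [hnone]
      constructor
      · exact fun h => absurd h (not_mem_pvFirsts categories 0 ["Unknown"] _ v (by simp))
      · intro h; simp at h
    · have hfind : (fun p : Int × String => (p.2 != "Unknown") && (p.2 == k))
          = (fun p : Int × String => p.2 == k) := by
        funext p
        cases hpk : (p.2 == k) with
        | true =>
          have h2 : (p.2 != "Unknown") = true := by
            have := eq_of_beq hpk
            simp [bne, this, hu]
          simp [h2]
        | false => simp
      rw [hfind, hT, mem_pvFirsts_iff categories 0 ["Unknown"] k v (by simpa using hu)]
      constructor
      · intro h; rw [h]; rfl
      · intro h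
        rcases Option.map_eq_some_iff.mp h with ⟨p, hp, hpv⟩
        have hpk : (p.2 == k) = true := List.find?_some (p := fun q : Int × String => q.2 == k) hp
        have hpe : p = (v, k) := by
          rcases p with ⟨p1, p2⟩
          simp only at hpv
          rw [Prod.mk.injEq]
          exact ⟨hpv, eq_of_beq hpk⟩
        rw [← hpe]; exact hp
  have hsorted : PySem.List.sorted first.items (fun kv => kv.2) = T :=
    PySem.List.sorted_eq_of_perm_of_pairwise_lt first.items T (fun kv => kv.2)
      ((List.perm_ext_iff_of_nodup hTnodup hfnodup).mpr hmemT) hTpair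
  rw [hsorted]
  -- B side: the result dict, built over fresh distinct keys
  have hfresh : ∀ a ∈ PySem.List.enumerate T 1,
      (PySem.Dict.ofList [(("Unknown" : String), (0 : Int))]).contains a.2.1 = false := by
    intro a ha
    rcases (PySem.List.mem_enumerate_iff _ _ _).mp ha with ⟨j, hj, haj⟩
    have h1 : T[j].1 ∉ ["Unknown"] :=
      pvFirsts_fst_not_mem_seen categories 0 ["Unknown"] _ (List.getElem_mem hj)
    have h2 : T[j].1 ≠ "Unknown" := by simpa using h1
    rw [haj]
    simp [PySem.Dict.ofList, PySem.Dict.update, List.foldl, PySem.Dict.contains_insert,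
      PySem.Dict.contains_empty, h2]
  have hknodup : ((PySem.List.enumerate T 1).map (fun a => a.2.1)).Nodup := by
    have h : (PySem.List.enumerate T 1).map (fun a => a.2.1)
        = ((PySem.List.enumerate T 1).map Prod.snd).map Prod.fst := by
      rw [List.map_map]; rfl
    rw [h, PySem.List.map_snd_enumerate, hT]
    exact pvFirsts_fst_nodup categories 0 ["Unknown"]
  rw [PySem.Dict.items_foldl_insert_fresh _ (fun a : Int × (String × Int) => a.2.1)
    (fun a : Int × (String × Int) => a.1) _ hfresh hknodup, hinit]
  rw [List.singleton_append, pvNews_eq_map_fst categories 0 ["Unknown"], ← hT,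
    pvEnumerate_map_fst, List.map_map]
  rfl
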